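-- pv_equiv track=rewrite | github.com/fbientrigo/radiationXlabs_notebooks | tests/test_cpld_decode.py | _expected_cumulative_counts
-- ===== SOURCE A (Python) =====
-- from typing import Dict, Iterable, List, Sequence
--
-- def _expected_cumulative_counts(
--     sequence: Sequence[Sequence[int]], n_bits: int = 16
-- ) -> List[List[int]]:
--     """Return per-row cumulative counts for each bit in ``sequence``."""
--
--     history = [[0] * len(sequence) for _ in range(n_bits)]
--     prev_state = [0] * n_bits
--     totals = [0] * n_bits
--
--     for row_index, active_bits in enumerate(sequence):
--         current_state = [0] * n_bits
--         for bit in active_bits: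
--             current_state[bit] = 1
--         for bit in range(n_bits):
--             if prev_state[bit] == 0 and current_state[bit] == 1:
--                 totals[bit] += 1
--             history[bit][row_index] = totals[bit]
--             prev_state[bit] = current_state[bit]
--     return history
-- ===== SOURCE B (Python) =====
-- def _expected_cumulative_counts(sequence, n_bits=16):
--     """Build the per-row state table first, then scan each bit's column independently."""
--     states = []
--     for active_bits in sequence:
--         state = [0] * n_bits
--         for bit in active_bits:
--             state[bit] = 1
--         states.append(state)
--     history = []
--     for j in range(n_bits):
--         col = []
--         total = 0
--         prev = 0
--         for state in states:
--             cur = state[j]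
--             if prev == 0 and cur == 1:
--                 total += 1
--             col.append(total)
--             prev = cur
--         history.append(col)
--     return history
-- ===== Notes on version B (the rewrite author's own statement) =====
-- stated objective: alternative
-- what changed: A makes one interleaved pass over the rows, mutating three parallel arrays (history, prev_state, totals) for every bit inside each row and writing into a preallocated history; B first builds the per-row state table, then computes each bit's column independently with a running rising-edge counter, appending finished columns.
import Mathlib
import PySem

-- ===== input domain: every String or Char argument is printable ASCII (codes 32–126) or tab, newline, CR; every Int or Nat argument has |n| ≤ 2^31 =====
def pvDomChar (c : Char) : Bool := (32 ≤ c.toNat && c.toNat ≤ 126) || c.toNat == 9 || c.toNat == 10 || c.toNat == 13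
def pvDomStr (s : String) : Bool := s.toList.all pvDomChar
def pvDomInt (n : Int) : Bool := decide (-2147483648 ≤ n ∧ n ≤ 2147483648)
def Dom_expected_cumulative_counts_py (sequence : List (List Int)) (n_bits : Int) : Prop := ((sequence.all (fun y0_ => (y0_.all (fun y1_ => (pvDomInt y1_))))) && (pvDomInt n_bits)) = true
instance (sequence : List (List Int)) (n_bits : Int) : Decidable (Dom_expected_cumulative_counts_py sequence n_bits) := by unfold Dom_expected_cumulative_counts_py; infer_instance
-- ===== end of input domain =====

-- B builds the result column by column (normalise each row into a set once, then an independent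
-- rising-edge scan per bit) instead of A's interleaved per-row mutation of three state arrays;
-- objective: alternative decomposition, same asymptotic cost.

-- ===== PORT A =====
-- current_state = [0]*n_bits; for bit in active_bits: current_state[bit] = 1
def pvCurA (n_bits : Int) (active_bits : List Int) : List Int :=
  active_bits.foldl (fun cur b => PySem.List.pySetD cur b 1) (List.replicate n_bits.toNat (0 : Int))

-- body of 'for bit in range(n_bits)': state is (history, prev_state, totals)
def pvBitStepA (current : List Int) (row_index : Int)
    (st : List (List Int) × List Int × List Int) (bit : Int) :
    List (List Int) × List Int × List Int :=
  let totals' := if PySem.List.pyGetD st.2.1 bit 0 = 0 ∧ PySem.List.pyGetD current bit 0 = 1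
                 then PySem.List.pySetD st.2.2 bit (PySem.List.pyGetD st.2.2 bit 0 + 1)
                 else st.2.2
  (PySem.List.pySetD st.1 bit
     (PySem.List.pySetD (PySem.List.pyGetD st.1 bit []) row_index (PySem.List.pyGetD totals' bit 0)),
   PySem.List.pySetD st.2.1 bit (PySem.List.pyGetD current bit 0),
   totals')

-- body of 'for row_index, active_bits in enumerate(sequence)'
def pvRowStepA (n_bits : Int) (st : List (List Int) × List Int × List Int)
    (rowp : Int × List Int) : List (List Int) × List Int × List Int :=
  (PySem.List.pyRange 0 n_bits 1).foldl (pvBitStepA (pvCurA n_bits rowp.2) rowp.1) st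

def expected_cumulative_counts_py (sequence : List (List Int)) (n_bits : Int) : List (List Int) :=
  ((PySem.List.enumerate sequence 0).foldl (pvRowStepA n_bits)
    ((PySem.List.pyRange 0 n_bits 1).map (fun _ => List.replicate sequence.length (0 : Int)),
     List.replicate n_bits.toNat (0 : Int),
     List.replicate n_bits.toNat (0 : Int))).1

-- ===== PORT B =====
-- state = [0]*n_bits; for bit in active_bits: state[bit] = 1
def pvStateB (n_bits : Int) (active_bits : List Int) : List Int :=
  active_bits.foldl (fun st b => PySem.List.pySetD st b 1) (List.replicate n_bits.toNat (0 : Int))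

-- body of 'for state in states': scan state is (col, prev, total)
def pvColStepB (j : Int) (st : List Int × Int × Int) (state : List Int) :
    List Int × Int × Int :=
  let cur : Int := PySem.List.pyGetD state j 0
  let total := if st.2.1 = 0 ∧ cur = 1 then st.2.2 + 1 else st.2.2
  (st.1 ++ [total], cur, total)

def expected_cumulative_counts_py_alt (sequence : List (List Int)) (n_bits : Int) : List (List Int) :=
  let states := sequence.foldl (fun acc active_bits => acc ++ [pvStateB n_bits active_bits]) []
  (PySem.List.pyRange 0 n_bits 1).foldl
    (fun history j => history ++ [(states.foldl (pvColStepB j) ([], 0, 0)).1]) []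

-- ===== PRECONDITION & SPEC =====
-- Pre_ excludes exactly the inputs on which A raises IndexError: some bit of some row is not a
-- valid Python index into a list of length max(n_bits, 0).
def Pre_expected_cumulative_counts_py (sequence : List (List Int)) (n_bits : Int) : Prop :=
  ∀ row ∈ sequence, ∀ b ∈ row, PySem.Raise.InRange n_bits.toNat b
instance (sequence : List (List Int)) (n_bits : Int) : Decidable (Pre_expected_cumulative_counts_py sequence n_bits) := by unfold Pre_expected_cumulative_counts_py; infer_instance

def pvWitness_expected_cumulative_counts_py : List (List Int) × Int := ([[0], [], [1, -2]], 2)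

def Spec_expected_cumulative_counts_py (sequence : List (List Int)) (n_bits : Int) (out : List (List Int)) : Prop := out = expected_cumulative_counts_py_alt sequence n_bits
instance (sequence : List (List Int)) (n_bits : Int) (out : List (List Int)) : Decidable (Spec_expected_cumulative_counts_py sequence n_bits out) := by unfold Spec_expected_cumulative_counts_py; infer_instance

-- ===== CLAIM (what is proved, stated in full; the proofs are below) =====
def Claim_equal_expected_cumulative_counts_py : Prop := ∀ (sequence : List (List Int)) (n_bits : Int), Dom_expected_cumulative_counts_py sequence n_bits → Pre_expected_cumulative_counts_py sequence n_bits → Spec_expected_cumulative_counts_py sequence n_bits (expected_cumulative_counts_py sequence n_bits)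

-- ===== LEMMAS AND PROOFS =====

-- B's column scan over the raw rows (what port B computes for bit j, after List.foldl_map)
def pvColFold (n_bits : Int) (j : Int) (st : List Int × Int × Int) (rows : List (List Int)) :
    List Int × Int × Int :=
  rows.foldl (fun st row => pvColStepB j st (pvStateB n_bits row)) st

def pvNewT (cur : List Int) (fp ft : Nat → Int) (k : Nat) : Int :=
  if fp k = 0 ∧ cur.getD k 0 = 1 then ft k + 1 else ft k

theorem getD_set_eq (c : List Int) (m k : Nat) (v : Int) :
    (c.set m v).getD k 0 = if m = k ∧ k < c.length then v else c.getD k 0 := by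
  simp [List.getD, List.getElem?_set]
  split <;> split <;> simp_all <;> omega

theorem innerA (n : Nat) (cur : List Int) (i : Int)
    (fh : Nat → List Int) (fp ft : Nat → Int) :
    ∀ (m : Nat), m ≤ n →
    (List.range m).foldl (fun st (k : Nat) => pvBitStepA cur i st (k : Int))
      ((List.range n).map fh, (List.range n).map fp, (List.range n).map ft)
    = ((List.range n).map (fun k => if k < m then PySem.List.pySetD (fh k) i (pvNewT cur fp ft k) else fh k),
       (List.range n).map (fun k => if k < m then cur.getD k 0 else fp k),
       (List.range n).map (fun k => if k < m then pvNewT cur fp ft k else ft k)) := by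
  intro m
  induction m with
  | zero => intro _; simp
  | succ m ih =>
    intro hm
    have hmn : m < n := by omega
    rw [List.range_succ, List.foldl_append, ih (by omega)]
    simp only [List.foldl_cons, List.foldl_nil]
    unfold pvBitStepA
    simp only [PySem.List.pyGetD_natCast, PySem.List.pySetD_natCast,
      PySem.List.getD_map_range _ _ _ _ hmn, lt_irrefl, if_false]
    by_cases hC : fp m = 0 ∧ cur.getD m 0 = 1
    · rw [if_pos hC, getD_set_eq]
      rw [if_pos (by simp [hmn])]
      refine Prod.ext ?_ (Prod.ext ?_ ?_) <;> simp only <;>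
        (apply List.ext_getElem
         · simp
         · intro idx h1 h2
           simp only [List.getElem_set, List.getElem_map, List.getElem_range]
           by_cases he : m = idx
           · subst he
             have hc2 := hC.2
             simp only [List.getD] at hc2 ⊢
             simp [pvNewT, hC.1, hc2, List.getD]
           · rw [if_neg he]
             by_cases hlt : idx < m
             · rw [if_pos hlt, if_pos (by omega)]
             · rw [if_neg hlt, if_neg (by omega)])
    · rw [if_neg hC]
      rw [PySem.List.getD_map_range _ _ _ _ hmn, if_neg (lt_irrefl m)]
      refine Prod.ext ?_ (Prod.ext ?_ ?_) <;> simp only <;>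
        (apply List.ext_getElem
         · simp
         · intro idx h1 h2
           simp only [List.getElem_set, List.getElem_map, List.getElem_range]
           by_cases he : m = idx
           · subst he
             first
             | (simp only [pvNewT]; rw [if_neg hC]; simp)
             | simp
           · by_cases hlt : idx < m
             · simp [he, hlt, (show idx < m + 1 by omega)]
             · simp [he, hlt, (show ¬ idx < m + 1 by omega), (show ¬ (idx < m + 1 ∧ ¬ idx = m) by omega)])

theorem set_append_replicate (xs : List Int) (s mm : Nat) (v : Int) (hmm : 1 ≤ mm)
    (hxs : xs.length = s) :
    (xs ++ List.replicate mm (0 : Int)).set s v = xs ++ v :: List.replicate (mm - 1) (0 : Int) := by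
  subst hxs
  rw [List.set_append, if_neg (lt_irrefl xs.length)]
  cases mm with
  | zero => omega
  | succ m => simp [List.replicate_succ]

theorem outerA (n_bits : Int) (hn : 0 ≤ n_bits) (L : Nat) :
    ∀ (suf : List (List Int)) (g : Nat → List Int × Int × Int) (s : Nat),
    (∀ k, (g k).1.length = s) → s + suf.length ≤ L →
    (PySem.List.enumerate suf (s : Int)).foldl (pvRowStepA n_bits)
      ((List.range n_bits.toNat).map (fun k => (g k).1 ++ List.replicate (L - s) (0 : Int)),
       (List.range n_bits.toNat).map (fun k => (g k).2.1),
       (List.range n_bits.toNat).map (fun k => (g k).2.2))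
    = ((List.range n_bits.toNat).map (fun (k : Nat) => (pvColFold n_bits (k : Int) (g k) suf).1 ++ List.replicate (L - s - suf.length) (0 : Int)),
       (List.range n_bits.toNat).map (fun (k : Nat) => (pvColFold n_bits (k : Int) (g k) suf).2.1),
       (List.range n_bits.toNat).map (fun (k : Nat) => (pvColFold n_bits (k : Int) (g k) suf).2.2)) := by
  intro suf
  induction suf with
  | nil =>
    intro g s hlen hs
    simp [pvColFold, PySem.List.enumerate_nil]
  | cons row suf ih =>
    intro g s hlen hs
    have hn' : ((n_bits.toNat : Nat) : Int) = n_bits := Int.toNat_of_nonneg hn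
    have hs1 : s + 1 + suf.length ≤ L := by
      have hs2 := hs
      rw [List.length_cons] at hs2
      omega
    have hstate : pvStateB n_bits row = pvCurA n_bits row := rfl
    have hcur : ∀ k : Nat, PySem.List.pyGetD (pvStateB n_bits row) (k : Int) 0
        = (pvCurA n_bits row).getD k 0 := by
      intro k
      rw [hstate, PySem.List.pyGetD_natCast]
    rw [PySem.List.enumerate_cons, List.foldl_cons]
    have hstep : pvRowStepA n_bits
        ((List.range n_bits.toNat).map (fun k => (g k).1 ++ List.replicate (L - s) (0 : Int)),
         (List.range n_bits.toNat).map (fun k => (g k).2.1),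
         (List.range n_bits.toNat).map (fun k => (g k).2.2)) ((s : Int), row)
      = ((List.range n_bits.toNat).map
           (fun (k : Nat) => (pvColStepB (k : Int) (g k) (pvStateB n_bits row)).1 ++ List.replicate (L - (s + 1)) (0 : Int)),
         (List.range n_bits.toNat).map (fun (k : Nat) => (pvColStepB (k : Int) (g k) (pvStateB n_bits row)).2.1),
         (List.range n_bits.toNat).map (fun (k : Nat) => (pvColStepB (k : Int) (g k) (pvStateB n_bits row)).2.2)) := by
      have hpr := PySem.List.pyRange_zero_natCast n_bits.toNat
      rw [hn'] at hpr
      unfold pvRowStepA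
      rw [hpr, List.foldl_map]
      rw [innerA n_bits.toNat (pvCurA n_bits row) (s : Int)
            (fun k => (g k).1 ++ List.replicate (L - s) (0 : Int))
            (fun k => (g k).2.1) (fun k => (g k).2.2) n_bits.toNat (le_refl _)]
      refine Prod.ext ?_ (Prod.ext ?_ ?_) <;> simp only <;>
        (apply List.map_congr_left; intro k hk; rw [List.mem_range] at hk; rw [if_pos hk])
      · rw [PySem.List.pySetD_natCast]
        rw [set_append_replicate _ _ _ _ (by omega) (hlen k)]
        have hv : pvNewT (pvCurA n_bits row)
            (fun k => (g k).2.1) (fun k => (g k).2.2) k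
            = (pvColStepB (k : Int) (g k) (pvStateB n_bits row)).2.2 := by
          simp only [pvNewT, pvColStepB, hcur k]
        rw [hv, (show L - s - 1 = L - (s + 1) by omega)]
        simp [pvColStepB]
      · simp only [pvColStepB, hcur k]
      · simp only [pvNewT, pvColStepB, hcur k]
    rw [hstep]
    have hc1 : ((s : Int) + 1) = (((s + 1 : Nat) : Nat) : Int) := by push_cast; ring
    rw [hc1, ih (fun (k : Nat) => pvColStepB (k : Int) (g k) (pvStateB n_bits row)) (s + 1)
          (fun k => by simp [pvColStepB, hlen k])
          (by omega)]
    have harith : L - (s + 1) - suf.length = L - s - (row :: suf).length := by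
      simp; omega
    rw [harith]
    refine Prod.ext ?_ (Prod.ext ?_ ?_) <;> simp only <;>
      (apply List.map_congr_left; intro k hk;
       rw [show pvColFold n_bits (k : Int) (g k) (row :: suf)
             = pvColFold n_bits (k : Int) (pvColStepB (k : Int) (g k) (pvStateB n_bits row)) suf
           from rfl])

theorem altB_eq (sequence : List (List Int)) (n_bits : Int) (hn : 0 ≤ n_bits) :
    expected_cumulative_counts_py_alt sequence n_bits
      = (List.range n_bits.toNat).map
          (fun (k : Nat) => (pvColFold n_bits (k : Int) ([], 0, 0) sequence).1) := by
  have hpr := PySem.List.pyRange_zero_natCast n_bits.toNat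
  rw [Int.toNat_of_nonneg hn] at hpr
  unfold expected_cumulative_counts_py_alt
  rw [PySem.List.foldl_append_singleton_eq_map (pvStateB n_bits) sequence []]
  rw [List.nil_append]
  rw [PySem.List.foldl_append_singleton_eq_map
        (fun j => ((sequence.map (pvStateB n_bits)).foldl (pvColStepB j) ([], 0, 0)).1)]
  rw [hpr, List.map_map, List.nil_append]
  apply List.map_congr_left
  intro k _
  simp only [Function.comp]
  rw [List.foldl_map]
  rfl

theorem pyRange_neg (n_bits : Int) (h : n_bits < 0) : PySem.List.pyRange 0 n_bits 1 = [] := by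
  simp [PySem.List.pyRange]; omega

theorem expected_cumulative_counts_py_spec : Claim_equal_expected_cumulative_counts_py := by
  intro sequence n_bits _hdom _hpre
  unfold Spec_expected_cumulative_counts_py
  by_cases hn : 0 ≤ n_bits
  · have hpr := PySem.List.pyRange_zero_natCast n_bits.toNat
    rw [Int.toNat_of_nonneg hn] at hpr
    have ho := outerA n_bits hn sequence.length sequence (fun _ => ([], 0, 0)) 0
      (fun _ => rfl) (by omega)
    simp only [Nat.cast_zero, Nat.sub_zero] at ho
    have e1' : (List.range n_bits.toNat).map
          (fun (_ : Nat) => ([] : List Int) ++ List.replicate sequence.length (0 : Int))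
        = (PySem.List.pyRange 0 n_bits 1).map (fun _ => List.replicate sequence.length (0 : Int)) := by
      rw [hpr, List.map_map]
      rfl
    have e2' : (List.range n_bits.toNat).map (fun (_ : Nat) => (0 : Int))
        = List.replicate n_bits.toNat (0 : Int) := by
      simp [List.map_const']
    rw [e1', e2'] at ho
    unfold expected_cumulative_counts_py
    rw [ho, altB_eq _ _ hn]
    simp only
    apply List.map_congr_left
    intro k _
    simp
  · have hrange := pyRange_neg n_bits (by omega)
    have hid : pvRowStepA n_bits = fun st _ => st := by
      funext st p
      unfold pvRowStepA
      rw [hrange]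
      rfl
    unfold expected_cumulative_counts_py expected_cumulative_counts_py_alt
    rw [hid, List.foldl_fixed, hrange]
    rfl
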